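-- pv_equiv track=rewrite | github.com/nutcasericky/personal_web | cumulative_array_ss.py | generate_cumulative_array
-- ===== SOURCE A (Python) =====
-- def generate_cumulative_array(n, MUS):
--
--     width = len(MUS)
--
--     p = []#1 or 0, determine whether to assign shares, assign if p not in the set
--     for i in range(1, n+1):
--         P_i = []
--         for j in range(width):
--             if i not in MUS[j]: P_i.append(1)
--             else: P_i.append(0)
--
--         p.append(P_i)
--
--     return p
-- ===== SOURCE B (Python) =====
-- def generate_cumulative_array(n, MUS):
--     width = len(MUS)
--     p = [[1] * width for _ in range(n)]
--     for j, row in enumerate(MUS):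
--         for v in row:
--             if 1 <= v <= n:
--                 p[v - 1][j] = 0
--     return p
-- ===== Notes on version B (the rewrite author's own statement) =====
-- stated objective: alternative
-- what changed: B pre-fills the n-by-width matrix with 1s and scatters 0s by iterating once over each membership set, instead of A's cell-by-cell 'i in MUS[j]' membership scans for every (row, column) pair.
import Mathlib
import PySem

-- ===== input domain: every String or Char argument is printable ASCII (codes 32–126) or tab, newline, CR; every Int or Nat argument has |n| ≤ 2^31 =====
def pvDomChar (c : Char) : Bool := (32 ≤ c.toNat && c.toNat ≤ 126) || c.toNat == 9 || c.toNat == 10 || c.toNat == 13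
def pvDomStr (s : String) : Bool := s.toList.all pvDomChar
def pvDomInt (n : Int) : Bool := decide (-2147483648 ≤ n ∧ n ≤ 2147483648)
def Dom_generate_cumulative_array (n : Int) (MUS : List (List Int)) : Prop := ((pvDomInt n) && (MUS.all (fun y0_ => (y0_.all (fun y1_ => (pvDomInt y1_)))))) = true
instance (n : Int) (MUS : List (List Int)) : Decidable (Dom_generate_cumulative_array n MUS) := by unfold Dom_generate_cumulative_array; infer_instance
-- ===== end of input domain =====

-- B builds each row pre-filled with 1s and scatters 0s from the membership sets (one pass over
-- the sets) instead of testing `i in MUS[j]` for every cell; return values are proved equal.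

-- ===== PORT A =====
-- row index i runs over range(1, n+1); MUS[j] for j in range(width) is always in range,
-- so pyGetD with default [] is exact here
def generate_cumulative_array (n : Int) (MUS : List (List Int)) : List (List Int) :=
  let width : Int := MUS.length
  (PySem.List.pyRange 1 (n + 1) 1).foldl
    (fun p i =>
      p ++ [(PySem.List.pyRange 0 width 1).foldl
        (fun Pi j =>
          if i ∉ PySem.List.pyGetD MUS j [] then Pi ++ [(1 : Int)] else Pi ++ [(0 : Int)])
        []])
    []

-- ===== PORT B =====
-- p[r][c] := 0 (no-op when out of range, which the guard in the fold prevents for rows)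
def pvZeroAt (m : List (List Int)) (r c : Nat) : List (List Int) :=
  m.set r ((m.getD r []).set c 0)

def generate_cumulative_array_alt (n : Int) (MUS : List (List Int)) : List (List Int) :=
  let width := MUS.length
  let p0 := List.replicate n.toNat (List.replicate width (1 : Int))
  (MUS.foldl
    (fun st row =>
      (row.foldl (fun m v => if 1 ≤ v ∧ v ≤ n then pvZeroAt m (v - 1).toNat st.2 else m) st.1,
       st.2 + 1))
    (p0, 0)).1

-- ===== PRECONDITION & SPEC =====
def Spec_generate_cumulative_array (n : Int) (MUS : List (List Int)) (out : List (List Int)) : Prop := out = generate_cumulative_array_alt n MUS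
instance (n : Int) (MUS : List (List Int)) (out : List (List Int)) : Decidable (Spec_generate_cumulative_array n MUS out) := by unfold Spec_generate_cumulative_array; infer_instance

-- ===== CLAIM (what is proved, stated in full; the proofs are below) =====
def Claim_equal_generate_cumulative_array : Prop := ∀ (n : Int) (MUS : List (List Int)), Dom_generate_cumulative_array n MUS → Spec_generate_cumulative_array n MUS (generate_cumulative_array n MUS)

-- ===== LEMMAS AND PROOFS =====

-- matrix entry (total, with an arbitrary default read only out of range)
def pvE (m : List (List Int)) (r c : Nat) : Int := (m.getD r []).getD c 37

-- shape: N rows, each of width W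
def pvShape (N W : Nat) (m : List (List Int)) : Prop :=
  m.length = N ∧ ∀ row ∈ m, row.length = W

lemma pvShape_zeroAt {N W : Nat} {m : List (List Int)} (h : pvShape N W m) (r c : Nat) :
    pvShape N W (pvZeroAt m r c) := by
  obtain ⟨hlen, hrow⟩ := h
  by_cases hr : r < m.length
  · refine ⟨by simpa [pvZeroAt] using hlen, ?_⟩
    intro row hmem
    rcases List.mem_or_eq_of_mem_set hmem with h1 | h2
    · exact hrow _ h1
    · subst h2
      simp only [List.length_set, List.getD, List.getElem?_eq_getElem hr, Option.getD_some]
      exact hrow _ (List.getElem_mem hr)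
  · have hno : pvZeroAt m r c = m := by
      simp [pvZeroAt, List.set_eq_of_length_le (Nat.le_of_not_lt hr)]
    rw [hno]; exact ⟨hlen, hrow⟩

lemma pvE_zeroAt {N W : Nat} {m : List (List Int)} (h : pvShape N W m)
    {r c' : Nat} (hr : r < N) (hc' : c' < W) (t c : Nat) :
    pvE (pvZeroAt m t c) r c' = if r = t ∧ c' = c then 0 else pvE m r c' := by
  obtain ⟨hlen, hrow⟩ := h
  have hrm : r < m.length := by omega
  by_cases hrt : r = t
  · subst hrt
    have hx : (pvZeroAt m r c)[r]? = some ((m[r]?.getD ([] : List Int)).set c 0) := by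
      simpa [List.getD] using List.getElem?_set_self (l := m) (a := (m.getD r []).set c 0) hrm
    have hWr : (m[r]?.getD ([] : List Int)).length = W := by
      rw [List.getElem?_eq_getElem hrm]
      simpa using hrow _ (List.getElem_mem hrm)
    simp only [pvE, List.getD, hx, Option.getD_some]
    by_cases hcc : c' = c
    · subst hcc
      rw [List.getElem?_set_self (by omega)]
      simp
    · rw [List.getElem?_set_ne (fun hh => hcc hh.symm)]
      simp [hcc]
  · simp only [pvE, List.getD, pvZeroAt]
    rw [List.getElem?_set_ne (fun hh => hrt hh.symm)]
    simp [hrt]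

lemma pv_inner_entry (n : Int) (c : Nat) {N W : Nat} {r c' : Nat}
    (hr : r < N) (hc' : c' < W) (hN : N = n.toNat) :
    ∀ (row : List Int) (m : List (List Int)), pvShape N W m →
      pvE (row.foldl (fun m v => if 1 ≤ v ∧ v ≤ n then pvZeroAt m (v - 1).toNat c else m) m) r c'
        = if c' = c ∧ ((r : Int) + 1) ∈ row then 0 else pvE m r c' := by
  intro row
  induction row with
  | nil => intro m h; simp
  | cons v rest ih =>
      intro m h
      simp only [List.foldl_cons]
      by_cases hv : 1 ≤ v ∧ v ≤ n
      · rw [if_pos hv, ih _ (pvShape_zeroAt h _ _), pvE_zeroAt h hr hc' (v - 1).toNat c]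
        by_cases hm : c' = c ∧ ((r : Int) + 1) ∈ rest
        · simp [hm.1, hm.2]
        · rw [if_neg hm]
          have hiff : (r = (v - 1).toNat ∧ c' = c) ↔ (c' = c ∧ ((r : Int) + 1) ∈ v :: rest) := by
            constructor
            · rintro ⟨h1, h2⟩
              exact ⟨h2, by simp only [List.mem_cons]; left; omega⟩
            · rintro ⟨h2, h3⟩
              rcases List.mem_cons.mp h3 with h4 | h4
              · exact ⟨by omega, h2⟩
              · exact absurd ⟨h2, h4⟩ hm
          rw [if_congr hiff rfl rfl]
      · rw [if_neg hv, ih _ h]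
        have hne : ((r : Int) + 1) ≠ v := by omega
        simp [List.mem_cons, hne]

lemma pv_inner_shape (n : Int) (c : Nat) {N W : Nat} :
    ∀ (row : List Int) (m : List (List Int)), pvShape N W m →
      pvShape N W (row.foldl (fun m v => if 1 ≤ v ∧ v ≤ n then pvZeroAt m (v - 1).toNat c else m) m) := by
  intro row
  induction row with
  | nil => intro m h; exact h
  | cons v rest ih =>
      intro m h
      simp only [List.foldl_cons]
      split
      · exact ih _ (pvShape_zeroAt h _ _)
      · exact ih _ h

lemma pv_outer_shape (n : Int) {N W : Nat} :
    ∀ (L : List (List Int)) (m : List (List Int)) (j : Nat), pvShape N W m →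
      pvShape N W ((L.foldl
        (fun st row =>
          (row.foldl (fun m v => if 1 ≤ v ∧ v ≤ n then pvZeroAt m (v - 1).toNat st.2 else m) st.1,
           st.2 + 1)) (m, j)).1) := by
  intro L
  induction L with
  | nil => intro m j h; exact h
  | cons row rest ih =>
      intro m j h
      simpa using ih _ (j + 1) (pv_inner_shape n j row m h)

lemma pv_outer_entry (n : Int) {N W : Nat} {r c' : Nat}
    (hr : r < N) (hc' : c' < W) (hN : N = n.toNat) :
    ∀ (L : List (List Int)) (m : List (List Int)) (j : Nat), pvShape N W m →
      pvE ((L.foldl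
        (fun st row =>
          (row.foldl (fun m v => if 1 ≤ v ∧ v ≤ n then pvZeroAt m (v - 1).toNat st.2 else m) st.1,
           st.2 + 1)) (m, j)).1) r c'
        = if j ≤ c' ∧ ((r : Int) + 1) ∈ L.getD (c' - j) [] then 0 else pvE m r c' := by
  intro L
  induction L with
  | nil => intro m j h; simp
  | cons row rest ih =>
      intro m j h
      simp only [List.foldl_cons]
      rw [show ((row.foldl (fun m v => if 1 ≤ v ∧ v ≤ n then pvZeroAt m (v - 1).toNat j else m) m, j + 1) :
            List (List Int) × Nat) = (_, j + 1) from rfl]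
      rw [ih _ (j + 1) (pv_inner_shape n j row m h)]
      rw [pv_inner_entry n j hr hc' hN row m h]
      by_cases hcj : c' = j
      · subst hcj
        simp [show ¬ (c' + 1 ≤ c') from by omega]
      · by_cases hle : j ≤ c'
        · have h1 : j + 1 ≤ c' := by omega
          have h2 : c' - j = (c' - (j + 1)) + 1 := by omega
          rw [h2]
          simp [h1, hle, hcj]
        · simp [hle, show ¬ (j + 1 ≤ c') from by omega, hcj]

lemma pvA_map (n : Int) (MUS : List (List Int)) :
    generate_cumulative_array n MUS =
      (PySem.List.pyRange 1 (n + 1) 1).map (fun i =>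
        (PySem.List.pyRange 0 (MUS.length : Int) 1).map (fun j =>
          if i ∉ PySem.List.pyGetD MUS j [] then (1 : Int) else 0)) := by
  unfold generate_cumulative_array
  have step : ∀ (i : Int),
      (fun (Pi : List Int) j =>
        if i ∉ PySem.List.pyGetD MUS j [] then Pi ++ [(1 : Int)] else Pi ++ [(0 : Int)])
      = fun (Pi : List Int) j => Pi ++ [if i ∉ PySem.List.pyGetD MUS j [] then (1 : Int) else 0] := by
    intro i; funext Pi j
    by_cases hh : i ∉ PySem.List.pyGetD MUS j [] <;> simp [hh]
  simp only [step, PySem.List.foldl_append_singleton_eq_map, List.nil_append]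

-- ===== VERDICT (by name: the statement is the Claim_ definition above) =====
theorem generate_cumulative_array_spec : Claim_equal_generate_cumulative_array := by
  intro n MUS _
  unfold Spec_generate_cumulative_array
  rw [pvA_map]
  have hshape0 : pvShape n.toNat MUS.length
      (List.replicate n.toNat (List.replicate MUS.length (1 : Int))) :=
    ⟨by simp, by intro row h; simp [List.eq_of_mem_replicate h]⟩
  have hshape : pvShape n.toNat MUS.length (generate_cumulative_array_alt n MUS) :=
    pv_outer_shape (N := n.toNat) (W := MUS.length) n MUS _ 0 hshape0
  apply List.ext_getElem
  · simp only [List.length_map, PySem.List.length_pyRange_one, hshape.1]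
    omega
  · intro r h1 h2
    have hr : r < n.toNat := by
      have := h1
      simp only [List.length_map, PySem.List.length_pyRange_one] at this
      omega
    apply List.ext_getElem
    · simp only [List.getElem_map, List.length_map, PySem.List.length_pyRange_one]
      exact (hshape.2 _ (List.getElem_mem h2)).symm
    · intro c h3 h4
      have hc : c < MUS.length := by
        simp only [List.getElem_map, List.length_map, PySem.List.length_pyRange_one] at h3
        omega
      have hA : (((PySem.List.pyRange 1 (n + 1) 1).map (fun i =>
            (PySem.List.pyRange 0 (MUS.length : Int) 1).map (fun j =>
              if i ∉ PySem.List.pyGetD MUS j [] then (1 : Int) else 0)))[r]'h1)[c]'h3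
          = if ((r : Int) + 1) ∈ MUS.getD c [] then 0 else 1 := by
        simp only [List.getElem_map, PySem.List.getElem_pyRange_one]
        have h0c : ((0 : Int) + (c : Int)) = (c : Int) := by ring
        rw [h0c, PySem.List.pyGetD_natCast]
        by_cases hmem : ((r : Int) + 1) ∈ MUS.getD c []
        · simp [show ((1 : Int) + (r : Int)) = (r : Int) + 1 from by ring]
        · simp [show ((1 : Int) + (r : Int)) = (r : Int) + 1 from by ring]
      have hB : ((generate_cumulative_array_alt n MUS)[r]'h2)[c]'h4
          = if ((r : Int) + 1) ∈ MUS.getD c [] then 0 else 1 := by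
        have hE : ((generate_cumulative_array_alt n MUS)[r]'h2)[c]'h4
            = pvE (generate_cumulative_array_alt n MUS) r c := by
          simp [pvE, List.getD, List.getElem?_eq_getElem h2, List.getElem?_eq_getElem h4]
        rw [hE,
          show generate_cumulative_array_alt n MUS =
            (MUS.foldl
              (fun st row =>
                (row.foldl (fun m v => if 1 ≤ v ∧ v ≤ n then pvZeroAt m (v - 1).toNat st.2 else m)
                  st.1, st.2 + 1))
              (List.replicate n.toNat (List.replicate MUS.length (1 : Int)), 0)).1 from rfl,
          pv_outer_entry (W := MUS.length) n hr hc rfl MUS _ 0 hshape0]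
        have hinit : pvE (List.replicate n.toNat (List.replicate MUS.length (1 : Int))) r c = 1 := by
          simp [pvE, List.getD, hr, hc]
        rw [hinit]
        simp
      rw [hA, hB]
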